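-- pv_equiv track=rewrite | github.com/981377660LMT/algorithm-study | 21_位运算/二进制枚举与三进制枚举/枚举超集/index.py | enumerateSuperset
-- ===== SOURCE A (Python) =====
-- from typing import List
--
-- def enumerateSuperset(n: int, mask: int) -> List[int]:
--     """枚举超集
--
--     Args:
--         n: 集合大小
--         mask: 初始二进制掩码
--     """
--     res = []
--     g1 = mask
--     upper = 1 << n
--     while g1 < upper:
--         res.append(g1)
--         g1 = (g1 + 1) | mask
--     return res
-- ===== SOURCE B (Python) =====
-- from typing import List
--
-- def enumerateSuperset(n: int, mask: int) -> List[int]: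
--     """Enumerate supersets of mask within n bits, ascending, by doubling over free bit positions."""
--     if mask >= (1 << n):
--         return []
--     res = [mask]
--     for p in range(n):
--         if not (mask >> p) & 1:
--             res = res + [g | (1 << p) for g in res]
--     return res
-- ===== Notes on version B (the rewrite author's own statement) =====
-- stated objective: alternative
-- what changed: B replaces A's successor-trick while loop (g = (g+1)|mask) by a doubling construction: starting from [mask], for each free bit position it appends a copy of the list with that bit set, producing the same ascending enumeration; Pre_ excludes n < 0 (A raises ValueError on 1 << n) and mask < 0 (A loops forever).
import Mathlib
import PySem

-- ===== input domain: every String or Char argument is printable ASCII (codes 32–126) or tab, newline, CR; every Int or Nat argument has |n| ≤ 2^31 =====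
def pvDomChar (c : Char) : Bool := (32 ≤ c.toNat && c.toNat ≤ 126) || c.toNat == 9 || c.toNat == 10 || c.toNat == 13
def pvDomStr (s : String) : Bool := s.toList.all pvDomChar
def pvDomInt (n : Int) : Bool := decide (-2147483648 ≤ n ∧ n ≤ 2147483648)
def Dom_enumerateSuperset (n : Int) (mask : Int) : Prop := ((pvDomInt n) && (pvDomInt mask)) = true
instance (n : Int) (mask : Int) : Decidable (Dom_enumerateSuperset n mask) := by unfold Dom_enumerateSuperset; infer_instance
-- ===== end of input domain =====

-- B builds the same ascending superset list by doubling over the free bit positions instead of A's successor trick; same cost, different algorithm.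

-- ===== PORT A =====
-- the while loop of A; fuel bounds the iteration count (upper - mask + 1 always suffices on Pre_)
def pvLoopA (mask upper : Int) (g1 : Int) : Nat → List Int
  | 0 => []
  | fuel+1 =>
    if g1 < upper then g1 :: pvLoopA mask upper (PySem.Int.bor (g1 + 1) mask) fuel
    else []

def enumerateSuperset (n : Int) (mask : Int) : List Int :=
  -- upper = 1 << n; n.toNat is exact on Pre_ (0 ≤ n; Python raises for n < 0)
  pvLoopA mask ((1 : Int) <<< n.toNat) mask ((((1 : Int) <<< n.toNat) - mask).toNat + 1)

-- ===== PORT B =====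
def enumerateSuperset_alt (n : Int) (mask : Int) : List Int :=
  if ((1 : Int) <<< n.toNat) ≤ mask then []
  else
    (PySem.List.pyRange 0 n 1).foldl
      (fun res p =>
        if PySem.Int.band (mask >>> p.toNat) 1 = 0
        then res ++ res.map (fun g => PySem.Int.bor g ((1 : Int) <<< p.toNat))
        else res)
      [mask]

-- ===== PRECONDITION & SPEC =====
-- Pre_ excludes n < 0 (A raises ValueError on 1 << n) and mask < 0 (A's while loop never terminates).
def Pre_enumerateSuperset (n : Int) (mask : Int) : Prop := 0 ≤ n ∧ 0 ≤ mask
instance (n : Int) (mask : Int) : Decidable (Pre_enumerateSuperset n mask) := by unfold Pre_enumerateSuperset; infer_instance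
def pvWitness_enumerateSuperset : Int × Int := (3, 5)

def Spec_enumerateSuperset (n : Int) (mask : Int) (out : List Int) : Prop := out = enumerateSuperset_alt n mask
instance (n : Int) (mask : Int) (out : List Int) : Decidable (Spec_enumerateSuperset n mask out) := by unfold Spec_enumerateSuperset; infer_instance

-- ===== CLAIM (what is proved, stated in full; the proofs are below) =====
def Claim_equal_enumerateSuperset : Prop := ∀ (n : Int) (mask : Int), Dom_enumerateSuperset n mask → Pre_enumerateSuperset n mask → Spec_enumerateSuperset n mask (enumerateSuperset n mask)

-- ===== LEMMAS AND PROOFS =====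

-- Nat models of the two loops (proof-side only)
def pvLoopAN (m upper : Nat) (g : Nat) : Nat → List Nat
  | 0 => []
  | fuel+1 => if g < upper then g :: pvLoopAN m upper ((g+1) ||| m) fuel else []

def pvStepBN (m : Nat) (res : List Nat) (p : Nat) : List Nat :=
  if m >>> p &&& 1 = 0 then res ++ res.map (· ||| 2^p) else res

lemma pv_or_div_two (x y : Nat) : (x ||| y) / 2 = x/2 ||| y/2 := by
  apply Nat.eq_of_testBit_eq; intro k
  simp [← Nat.testBit_add_one, Nat.testBit_or]

lemma pv_and_div_two (x y : Nat) : (x &&& y) / 2 = x/2 &&& y/2 := by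
  apply Nat.eq_of_testBit_eq; intro k
  simp [← Nat.testBit_add_one, Nat.testBit_and]

lemma pv_lor_bit (a b : Nat) (i j : Nat) (hi : i < 2) (hj : j < 2) :
    (2*a+i) ||| (2*b+j) = 2*(a|||b) + (i|||j) := by
  interval_cases i <;> interval_cases j <;>
  · apply Nat.eq_of_testBit_eq
    intro k
    have h1 : ∀ c d : Nat, d < 2 → (2*c+d)/2 = c := by omega
    cases k with
    | zero =>
      simp [Nat.testBit_zero, Nat.testBit_or, Nat.mul_add_mod, Nat.mul_mod_right]
    | succ k =>
      simp only [Nat.testBit_add_one, pv_or_div_two]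
      simp [h1]

lemma pv_land_bit (a b : Nat) (i j : Nat) (hi : i < 2) (hj : j < 2) :
    (2*a+i) &&& (2*b+j) = 2*(a&&&b) + (i&&&j) := by
  interval_cases i <;> interval_cases j <;>
  · apply Nat.eq_of_testBit_eq
    intro k
    have h1 : ∀ c d : Nat, d < 2 → (2*c+d)/2 = c := by omega
    cases k with
    | zero =>
      simp [Nat.testBit_zero, Nat.testBit_and, Nat.mul_add_mod, Nat.mul_mod_right]
    | succ k =>
      simp only [Nat.testBit_add_one, pv_and_div_two]
      simp [h1]

lemma pv_disj_add_or : ∀ s m t : Nat, m + t ≤ s → t &&& m = 0 → m + t = m ||| t := by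
  intro s
  induction s with
  | zero =>
    intro m t h _
    have hm : m = 0 := by omega
    have ht : t = 0 := by omega
    subst hm; subst ht; rfl
  | succ s ih =>
    intro m t hle hd
    rcases Nat.eq_zero_or_pos (m + t) with h0 | hpos
    · have hm : m = 0 := by omega
      have ht : t = 0 := by omega
      subst hm; subst ht; rfl
    · have hm : m = 2*(m/2) + m%2 := by omega
      have ht : t = 2*(t/2) + t%2 := by omega
      have hd' : t &&& m = 2*(t/2 &&& m/2) + (t%2 &&& m%2) := by
        conv_lhs => rw [ht, hm]
        exact pv_land_bit _ _ _ _ (by omega) (by omega)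
      have h1 : t/2 &&& m/2 = 0 := by omega
      have h2 : t%2 &&& m%2 = 0 := by omega
      have ihx : m/2 + t/2 = m/2 ||| t/2 := ih (m/2) (t/2) (by omega) h1
      have hbit : m%2 + t%2 = m%2 ||| t%2 := by
        have hmm : m%2 = 0 ∨ m%2 = 1 := by omega
        have htt : t%2 = 0 ∨ t%2 = 1 := by omega
        rcases hmm with h|h <;> rcases htt with h'|h' <;> rw [h, h'] <;>
          first
          | rfl
          | (rw [h, h'] at h2; exact absurd h2 (by decide))
      calc m + t = 2*(m/2 + t/2) + (m%2 + t%2) := by omega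
        _ = 2*(m/2 ||| t/2) + (m%2 ||| t%2) := by rw [ihx, hbit]
        _ = (2*(m/2) + m%2) ||| (2*(t/2) + t%2) := (pv_lor_bit _ _ _ _ (by omega) (by omega)).symm
        _ = m ||| t := by rw [← hm, ← ht]

-- if x is a superset of m, then x decomposes as m plus a part disjoint from m
lemma pv_sup_decomp (m x : Nat) (h : x ||| m = x) :
    m + x.ldiff m = x ∧ (x.ldiff m) &&& m = 0 := by
  have hx : ∀ i, m.testBit i = true → x.testBit i = true := by
    intro i hi
    have := congrArg (fun y => y.testBit i) h
    simp [Nat.testBit_or] at this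
    exact this hi
  have hdisj : (x.ldiff m) &&& m = 0 := by
    apply Nat.eq_of_testBit_eq
    intro i
    simp [Nat.testBit_and, Nat.testBit_ldiff, Nat.zero_testBit]
  have hor : m ||| x.ldiff m = x := by
    apply Nat.eq_of_testBit_eq
    intro i
    simp [Nat.testBit_or, Nat.testBit_ldiff]
    cases hmi : m.testBit i
    · simp
    · simp [hx i hmi]
  refine ⟨?_, hdisj⟩
  rw [pv_disj_add_or (m + x.ldiff m) m (x.ldiff m) (le_refl _) hdisj]
  exact hor

lemma pv_sup_iff (m t : Nat) : ((m+t) ||| m = m+t) ↔ t &&& m = 0 := by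
  constructor
  · intro h
    have := pv_sup_decomp m (m+t) h
    have ht : (m+t).ldiff m = t := by omega
    rw [ht] at this
    exact this.2
  · intro h
    have hadd : m + t = m ||| t := pv_disj_add_or (m+t) m t (le_refl _) h
    rw [hadd, Nat.lor_assoc, Nat.lor_comm t m, ← Nat.lor_assoc, Nat.or_self]

lemma pv_next_no_sup : ∀ s x g m : Nat, x ≤ s → g ||| m = g → g < x → x < (g+1) ||| m →
    ¬ ((x ||| m) = x) := by
  intro s
  induction s with
  | zero => intro x g m hxs hg hgx hxn; omega
  | succ s ih =>
    intro x g m hxs hg hgx hxn hsup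
    have hgb : g%2 = 0 ∨ g%2 = 1 := by omega
    have hmb : m%2 = 0 ∨ m%2 = 1 := by omega
    have hxb : x%2 = 0 ∨ x%2 = 1 := by omega
    have hG : g ||| m = 2*(g/2 ||| m/2) + (g%2 ||| m%2) := by
      conv_lhs => rw [show g = 2*(g/2)+g%2 by omega, show m = 2*(m/2)+m%2 by omega]
      exact pv_lor_bit _ _ _ _ (by omega) (by omega)
    have hX : x ||| m = 2*(x/2 ||| m/2) + (x%2 ||| m%2) := by
      conv_lhs => rw [show x = 2*(x/2)+x%2 by omega, show m = 2*(m/2)+m%2 by omega]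
      exact pv_lor_bit _ _ _ _ (by omega) (by omega)
    -- superset facts, bitwise
    rcases hgb with hgb | hgb
    · -- g even forces m even and next = g+1: empty interval
      rcases hmb with hmb | hmb
      · have hN : (g+1) ||| m = 2*(g/2 ||| m/2) + (1 ||| 0) := by
          conv_lhs => rw [show g+1 = 2*(g/2)+1 by omega, show m = 2*(m/2)+m%2 by omega, hmb]
          exact pv_lor_bit _ _ _ _ (by omega) (by omega)
        have e1 : (1 ||| 0) = 1 := by decide
        have e0 : (0 ||| 0) = 0 := by decide
        -- from hg and hG : g/2 ||| m/2 = g/2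
        rw [hgb, hmb, e0] at hG
        have hab : g/2 ||| m/2 = g/2 := by omega
        rw [hab] at hN
        omega
      · -- m odd, g even contradicts g ||| m = g
        rw [hgb, hmb] at hG
        have e : (0 ||| 1) = 1 := by decide
        rw [e] at hG
        omega
    · -- g odd
      have hN : (g+1) ||| m = 2*((g/2+1) ||| m/2) + (0 ||| m%2) := by
        conv_lhs => rw [show g+1 = 2*(g/2+1)+0 by omega, show m = 2*(m/2)+m%2 by omega]
        exact pv_lor_bit _ _ _ _ (by omega) (by omega)
      have hgab : g/2 ||| m/2 = g/2 := by
        rcases hmb with hmb | hmb <;> rw [hgb, hmb] at hG <;> simp at hG <;> omega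
      have hsup' : 2*(x/2 ||| m/2) + (x%2 ||| m%2) = x := by rw [hX] at hsup; exact hsup
      have hyx : x/2 < x := by omega
      have e00 : ((0:Nat) ||| 0) = 0 := by decide
      have e01 : ((0:Nat) ||| 1) = 1 := by decide
      have e10 : ((1:Nat) ||| 0) = 1 := by decide
      have e11 : ((1:Nat) ||| 1) = 1 := by decide
      rcases hmb with hmb | hmb <;> rcases hxb with hxb' | hxb' <;>
        rw [hmb] at hN <;> rw [hmb, hxb'] at hsup' <;>
        first
      | (rw [e00] at hN hsup'
         exact ih (x/2) (g/2) (m/2) (by omega) hgab (by omega) (by omega) (by omega))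
      | (rw [e00] at hN; rw [e10] at hsup'
         exact ih (x/2) (g/2) (m/2) (by omega) hgab (by omega) (by omega) (by omega))
      | (rw [e01] at hN hsup'; omega)
      | (rw [e01] at hN; rw [e11] at hsup'
         exact ih (x/2) (g/2) (m/2) (by omega) hgab (by omega) (by omega) (by omega))

lemma pvLoopAN_nil (m upper g : Nat) (h : ¬ g < upper) : ∀ fuel, pvLoopAN m upper g fuel = [] := by
  intro fuel; cases fuel <;> simp [pvLoopAN, h]

lemma pv_next_sup (g m : Nat) : ((g+1) ||| m) ||| m = (g+1) ||| m := by
  rw [Nat.lor_assoc, Nat.or_self]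

lemma pvLoopAN_eq (m upper : Nat) : ∀ fuel g, g ||| m = g → upper ≤ g + fuel →
    pvLoopAN m upper g fuel = (List.range' g (upper - g)).filter (fun x => x ||| m = x) := by
  intro fuel
  induction fuel with
  | zero =>
    intro g _ hle
    have : upper - g = 0 := by omega
    simp [pvLoopAN, this]
  | succ fuel ih =>
    intro g hg hle
    by_cases hlt : g < upper
    · have hrange : List.range' g (upper - g) = g :: List.range' (g+1) (upper - g - 1) := by
        obtain ⟨k, hk⟩ : ∃ k, upper - g = k+1 := ⟨upper-g-1, by omega⟩
        rw [show upper - g - 1 = k by omega, hk, List.range'_succ]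
      rw [hrange]
      have hgoal : pvLoopAN m upper g (fuel+1)
          = g :: pvLoopAN m upper ((g+1) ||| m) fuel := by simp [pvLoopAN, hlt]
      rw [hgoal, List.filter_cons]
      simp only [hg, decide_true, if_true]
      congr 1
      set nx := (g+1) ||| m with hnx
      have hnxg : g + 1 ≤ nx := Nat.left_le_or
      have hnsup : nx ||| m = nx := pv_next_sup g m
      by_cases hnu : nx ≤ upper
      · have hsplit : List.range' (g+1) (upper - g - 1)
            = List.range' (g+1) (nx - g - 1) ++ List.range' nx (upper - nx) := by
          have := List.range'_append (s := g+1) (m := nx - g - 1) (n := upper - nx) (step := 1)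
          rw [show (g+1) + 1 * (nx - g - 1) = nx by omega] at this
          rw [this]
          congr 1
          omega
        rw [hsplit, List.filter_append]
        have hnil : (List.range' (g+1) (nx - g - 1)).filter (fun x => x ||| m = x) = [] := by
          rw [List.filter_eq_nil_iff]
          intro a ha
          rw [List.mem_range'_1] at ha
          simp only [decide_eq_true_eq]
          exact pv_next_no_sup a a g m (le_refl a) hg (by omega) (by omega)
        rw [hnil, List.nil_append]
        exact ih nx hnsup (by omega)
      · -- next exceeds upper: both sides empty
        rw [pvLoopAN_nil m upper nx (by omega)]
        symm
        rw [List.filter_eq_nil_iff]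
        intro a ha
        rw [List.mem_range'_1] at ha
        simp only [decide_eq_true_eq]
        exact pv_next_no_sup a a g m (le_refl a) hg (by omega) (by omega)
    · rw [pvLoopAN_nil m upper g hlt]
      have : upper - g = 0 := by omega
      simp [this]

lemma pv_filter_map {α β : Type} (p : β → Bool) (f : α → β) (l : List α) :
    (l.map f).filter p = (l.filter (fun x => p (f x))).map f := by
  induction l with
  | nil => rfl
  | cons a t ih => simp only [List.map_cons, List.filter_cons]; split <;> simp [*]

lemma pv_guard_iff (m p : Nat) : (m >>> p &&& 1 = 0) ↔ m.testBit p = false := by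
  rw [Nat.and_one_is_mod, Nat.shiftRight_eq_div_pow, Nat.testBit, Nat.one_and_eq_mod_two,
    Nat.shiftRight_eq_div_pow]
  simp

lemma pv_disjoint_two_pow (t p : Nat) (h : t.testBit p = false) : t &&& 2^p = 0 := by
  rw [Nat.and_two_pow, h]
  simp

lemma pv_add_two_pow_or (t p : Nat) (h : t.testBit p = false) : t + 2^p = t ||| 2^p := by
  have := pv_disj_add_or (t + 2^p) t (2^p) (le_refl _) (by rw [Nat.and_comm]; exact pv_disjoint_two_pow t p h)
  omega

lemma pvFoldBN_eq (m : Nat) : ∀ p : Nat,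
    (List.range p).foldl (pvStepBN m) [m]
      = ((List.range (2^p)).filter (fun t => t &&& m = 0)).map (fun t => m + t) := by
  intro p
  induction p with
  | zero => simp [Nat.zero_and]
  | succ p ih =>
    rw [List.range_succ, List.foldl_append, List.foldl_cons, List.foldl_nil, ih]
    rw [show 2^(p+1) = 2^p + 2^p by ring, List.range_add, List.filter_append, List.map_append]
    unfold pvStepBN
    by_cases hbit : m.testBit p
    · -- bit p of m is set: nothing new in either form
      rw [if_neg (by rw [pv_guard_iff]; simp [hbit])]
      have hnil : (List.filter (fun t => decide (t &&& m = 0)) ((List.range (2^p)).map (fun x => 2^p + x))) = [] := by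
        rw [List.filter_eq_nil_iff]
        intro a ha
        simp only [List.mem_map] at ha
        obtain ⟨t, ht, rfl⟩ := ha
        rw [List.mem_range] at ht
        simp only [decide_eq_true_eq]
        intro h0
        have h1 : (2^p + t) = 2^p ||| t := by
          have := pv_add_two_pow_or t p (Nat.testBit_lt_two_pow ht)
          rw [Nat.lor_comm] at this
          omega
        have h2 : ((2^p + t) &&& m).testBit p = true := by
          rw [Nat.testBit_and, h1, Nat.testBit_or]
          simp [Nat.testBit_two_pow_self, hbit]
        rw [h0] at h2
        simp [Nat.zero_testBit] at h2
      rw [hnil]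
      simp
    · -- bit p of m is free: the new upper half is the old list shifted by 2^p
      rw [if_pos (by rw [pv_guard_iff]; simp [hbit])]
      congr 1
      rw [pv_filter_map, List.map_map, List.map_map]
      have hcong : List.filter (fun x => decide ((2^p + x) &&& m = 0)) (List.range (2^p))
          = List.filter (fun t => decide (t &&& m = 0)) (List.range (2^p)) := by
        apply List.filter_congr
        intro t ht
        rw [List.mem_range] at ht
        have h1 : (2^p + t) = 2^p ||| t := by
          have := pv_add_two_pow_or t p (Nat.testBit_lt_two_pow ht)
          rw [Nat.lor_comm] at this
          omega
        have h2 : (2^p + t) &&& m = (2^p &&& m) ||| (t &&& m) := by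
          rw [h1, Nat.and_comm, Nat.and_or_distrib_left, Nat.and_comm m (2^p), Nat.and_comm m t]
        have h3 : 2^p &&& m = 0 := by
          rw [Nat.and_comm]
          exact pv_disjoint_two_pow m p (by simp [hbit])
        rw [h2, h3]
        simp
      rw [hcong]
      apply List.map_congr_left
      intro t ht
      rw [List.mem_filter, List.mem_range] at ht
      obtain ⟨ht, hd⟩ := ht
      simp only [decide_eq_true_eq] at hd
      simp only [Function.comp]
      -- (m + t) ||| 2^p = m + (2^p + t)
      have hmt : (m + t).testBit p = false := by
        have heq : m + t = m ||| t := pv_disj_add_or (m+t) m t (le_refl _) hd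
        rw [heq, Nat.testBit_or, Nat.testBit_lt_two_pow ht]
        simp [hbit]
      have := pv_add_two_pow_or (m+t) p hmt
      omega


lemma pv_nat_main (M N fuel : Nat) (hlt : M < 2^N) (hf : 2^N ≤ M + fuel) :
    pvLoopAN M (2^N) M fuel = (List.range N).foldl (pvStepBN M) [M] := by
  rw [pvLoopAN_eq M (2^N) fuel M (Nat.or_self M) hf, pvFoldBN_eq]
  rw [List.range'_eq_map_range, pv_filter_map]
  have hcong : List.filter (fun x => decide ((M + x) ||| M = M + x)) (List.range (2^N - M))
      = List.filter (fun t => decide (t &&& M = 0)) (List.range (2^N - M)) := by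
    apply List.filter_congr
    intro t _
    simp only [decide_eq_true_eq, pv_sup_iff]
  rw [hcong]
  congr 1
  rw [show 2^N = (2^N - M) + M by omega, List.range_add, List.filter_append]
  have hnil : (List.filter (fun t => decide (t &&& M = 0)) ((List.range M).map (fun x => (2^N - M) + x))) = [] := by
    rw [List.filter_eq_nil_iff]
    intro a ha
    simp only [List.mem_map] at ha
    obtain ⟨j, hj, rfl⟩ := ha
    rw [List.mem_range] at hj
    simp only [decide_eq_true_eq]
    intro h0
    have h1 : M + ((2^N - M) + j) = M ||| ((2^N - M) + j) :=
      pv_disj_add_or _ M _ (le_refl _) h0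
    have h2 : M ||| ((2^N - M) + j) < 2^N :=
      Nat.or_lt_two_pow hlt (by omega)
    omega
  rw [hnil, List.append_nil]
  rw [show (2^N - M) + M = 2^N by omega]

lemma pv_bridge_loopA : ∀ (fuel : Nat) (m u g : Nat),
    pvLoopA (m:Int) (u:Int) (g:Int) fuel = (pvLoopAN m u g fuel).map (fun x => Int.ofNat x) := by
  intro fuel
  induction fuel with
  | zero => intro m u g; rfl
  | succ fuel ih =>
    intro m u g
    rw [pvLoopA, pvLoopAN]
    by_cases h : g < u
    · rw [if_pos (by exact_mod_cast h), if_pos h]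
      have hc : PySem.Int.bor ((g:Int) + 1) (m:Int) = (((g+1) ||| m : Nat) : Int) := by
        push_cast
        exact PySem.Int.bor_natCast (g+1) m
      rw [hc, ih]
      simp
    · rw [if_neg (by exact_mod_cast h), if_neg h]
      rfl

lemma pv_shl_int (k : Nat) : ((1:Int) <<< k) = ((2^k : Nat) : Int) := by
  rw [Int.shiftLeft_eq]
  push_cast
  ring

lemma pv_shl_int2 (k : Nat) : ((1:Int) <<< ((k : Nat) : Int)) = ((2^k : Nat) : Int) := by
  rw [show (1:Int) = ((1:Nat):Int) from rfl, Int.shiftLeft_natCast, Nat.shiftLeft_eq, one_mul]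

lemma pv_bridge_fold (m : Nat) : ∀ (l : List Nat) (res : List Nat),
    (l.map (fun k => Int.ofNat k)).foldl
      (fun res p =>
        if PySem.Int.band ((m:Int) >>> p.toNat) 1 = 0
        then res ++ res.map (fun g => PySem.Int.bor g ((1 : Int) <<< ((p.toNat : Nat) : Int)))
        else res)
      (res.map (fun x => Int.ofNat x))
    = (l.foldl (pvStepBN m) res).map (fun x => Int.ofNat x) := by
  intro l
  induction l with
  | nil => intro res; rfl
  | cons k l ih =>
    intro res
    rw [List.map_cons, List.foldl_cons, List.foldl_cons]
    have htn : (Int.ofNat k).toNat = k := rfl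
    rw [htn]
    have hsr : ((m:Int) >>> ((k:Nat):Int)) = ((m >>> k : Nat) : Int) := by
      simp [Int.shiftRight_natCast, Int.natCast_shiftRight]
    rw [hsr, pv_shl_int2 k]
    have hband : PySem.Int.band ((m >>> k : Nat) : Int) 1 = ((m >>> k &&& 1 : Nat) : Int) := by
      rw [show (1:Int) = ((1:Nat):Int) from rfl, PySem.Int.band_natCast]
    rw [hband]
    by_cases hg : m >>> k &&& 1 = 0
    · rw [if_pos (by exact_mod_cast hg)]
      have hstep : (res.map (fun x => Int.ofNat x)) ++ (res.map (fun x => Int.ofNat x)).map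
            (fun g => PySem.Int.bor g (((2^k : Nat) : Int)))
          = (pvStepBN m res k).map (fun x => Int.ofNat x) := by
        rw [pvStepBN, if_pos hg, List.map_append, List.map_map, List.map_map]
        have hb : ∀ t : Nat, PySem.Int.bor (Int.ofNat t) ((2^k : Nat) : Int) = Int.ofNat (t ||| 2^k) := by
          intro t
          rw [show (Int.ofNat t) = ((t:Nat):Int) from rfl, PySem.Int.bor_natCast]
          rfl
        simp [Function.comp, hb]
        intro a _
        simpa using hb a
      rw [hstep, ih]
    · rw [if_neg (by exact_mod_cast hg)]
      conv_rhs => rw [pvStepBN, if_neg hg]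
      exact ih res

-- ===== VERDICT (by name: the statement is the Claim_ definition above) =====
theorem enumerateSuperset_spec : Claim_equal_enumerateSuperset := by
  intro n mask _ hpre
  unfold Spec_enumerateSuperset
  obtain ⟨hn, hm⟩ := hpre
  have hmask : mask = ((mask.toNat : Nat) : Int) := by omega
  have hupper : ((1:Int) <<< n.toNat) = ((2 ^ n.toNat : Nat) : Int) := pv_shl_int n.toNat
  unfold enumerateSuperset enumerateSuperset_alt
  rw [hmask, hupper]
  by_cases hlt : mask.toNat < 2 ^ n.toNat
  · rw [if_neg (by exact_mod_cast Nat.not_le.mpr hlt)]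
    have hfuel : ((((2 ^ n.toNat : Nat) : Int)) - ((mask.toNat : Nat) : Int)).toNat + 1
        = (2 ^ n.toNat - mask.toNat) + 1 := by omega
    rw [hfuel, pv_bridge_loopA]
    have hrange : PySem.List.pyRange 0 n 1 = (List.range n.toNat).map (fun k => Int.ofNat k) := by
      rw [PySem.List.pyRange_one]
      simp
    rw [hrange, show ([((mask.toNat : Nat) : Int)]) = ([mask.toNat].map (fun x => Int.ofNat x)) from rfl,
      pv_bridge_fold]
    rw [pv_nat_main mask.toNat n.toNat _ hlt (by omega)]
  · rw [if_pos (by exact_mod_cast Nat.le_of_not_lt hlt)]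
    rw [pv_bridge_loopA, pvLoopAN_nil mask.toNat (2 ^ n.toNat) mask.toNat (by omega)]
    rfl
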